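-- pv_equiv track=rewrite | github.com/Ashiq-am/Path-of-Python | 39.Python Programming Examples/3.List Programs/Python  Increment 1’s in list based on pattern/Method #1.py | transform
-- ===== SOURCE A (Python) =====
-- def transform(lst):
--     previous = 0
--     grp = 0
--     for elem in lst:
--         if elem and not previous:
--             grp += 1
--         previous = elem
--         yield (grp if elem else 0)
-- ===== SOURCE B (Python) =====
-- def transform(lst):
--     grp = 0
--     rest = lst
--     while rest:
--         if rest[0]:
--             k = 1
--             while k < len(rest) and rest[k]:
--                 k += 1
--             grp += 1
--             yield from [grp] * k
--         else:
--             k = 1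
--             while k < len(rest) and not rest[k]:
--                 k += 1
--             yield from [0] * k
--         rest = rest[k:]
-- ===== Notes on version B (the rewrite author's own statement) =====
-- stated objective: alternative
-- what changed: B scans the list run by run (emitting a whole block of equal labels per maximal truthy/falsy run) instead of A's per-element loop carrying a 'previous' state flag.
import Mathlib
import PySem

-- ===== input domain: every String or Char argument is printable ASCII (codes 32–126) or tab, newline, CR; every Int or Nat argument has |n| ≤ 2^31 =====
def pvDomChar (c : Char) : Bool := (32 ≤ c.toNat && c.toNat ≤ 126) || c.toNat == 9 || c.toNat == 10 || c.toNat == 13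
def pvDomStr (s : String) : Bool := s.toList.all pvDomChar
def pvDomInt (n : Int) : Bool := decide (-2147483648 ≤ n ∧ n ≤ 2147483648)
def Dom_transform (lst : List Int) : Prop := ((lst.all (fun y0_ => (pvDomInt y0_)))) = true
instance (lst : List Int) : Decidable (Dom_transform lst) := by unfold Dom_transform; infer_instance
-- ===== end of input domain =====

-- B is a run-based rewrite of A's per-element loop: same values, different pass structure.
-- Both Pythons are generators; equivalence is about the yielded sequence (as a list).

-- ===== PORT A =====
-- A's generator loop: state (previous, grp), one yield per element (yield = cons here).
def transformGo (previous grp : Int) : List Int → List Int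
  | [] => []
  | elem :: rest =>
    let grp' := if elem ≠ 0 ∧ previous = 0 then grp + 1 else grp
    (if elem ≠ 0 then grp' else 0) :: transformGo elem grp' rest

def transform (lst : List Int) : List Int := transformGo 0 0 lst

-- ===== PORT B =====
-- number of leading elements of the list satisfying p (B's inner `while k < len(rest) and …` scan)
def leadCount (p : Int → Bool) : List Int → Nat
  | [] => 0
  | x :: xs => if p x then leadCount p xs + 1 else 0

-- B's outer `while rest:` loop: emit a whole block per maximal run, then drop it.
def transformAltGo (grp : Int) (l : List Int) : List Int :=
  match l with
  | [] => []
  | x :: xs =>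
    if x ≠ 0 then
      let k := leadCount (· ≠ 0) xs + 1
      List.replicate k (grp + 1) ++ transformAltGo (grp + 1) (xs.drop (k - 1))
    else
      let k := leadCount (· == 0) xs + 1
      List.replicate k 0 ++ transformAltGo grp (xs.drop (k - 1))
termination_by l.length
decreasing_by
  · simp [List.length_drop]
  · simp [List.length_drop]

def transform_alt (lst : List Int) : List Int := transformAltGo 0 lst

-- ===== PRECONDITION & SPEC =====
def Spec_transform (lst : List Int) (out : List Int) : Prop := out = transform_alt lst
instance (lst : List Int) (out : List Int) : Decidable (Spec_transform lst out) := by unfold Spec_transform; infer_instance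

-- ===== CLAIM (what is proved, stated in full; the proofs are below) =====
def Claim_equal_transform : Prop := ∀ (lst : List Int), Dom_transform lst → Spec_transform lst (transform lst)

-- ===== LEMMAS AND PROOFS =====

-- transformGo only tests whether `previous` is zero, so any two nonzero prevs agree
theorem transformGo_prev_nonzero (l : List Int) (grp p q : Int) (hp : p ≠ 0) (hq : q ≠ 0) :
    transformGo p grp l = transformGo q grp l := by
  cases l with
  | nil => rfl
  | cons e rest =>
    simp only [transformGo]
    have : (if e ≠ 0 ∧ p = 0 then grp + 1 else grp) = (if e ≠ 0 ∧ q = 0 then grp + 1 else grp) := by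
      simp [hp, hq]
    rw [this]

-- if the head is zero (or the list empty), `previous` is irrelevant for transformGo
theorem transformGo_head_zero (xs : List Int) (grp p q : Int)
    (h : ∀ y, xs.head? = some y → y = 0) :
    transformGo p grp xs = transformGo q grp xs := by
  cases xs with
  | nil => rfl
  | cons e rest =>
    have he : e = 0 := h e rfl
    subst he
    simp [transformGo]

-- the element just after the counted run fails the predicate
theorem head_drop_leadCount (p : Int → Bool) (xs : List Int) :
    ∀ y, (xs.drop (leadCount p xs)).head? = some y → p y = false := by
  induction xs with
  | nil => intro y h; simp at h
  | cons x t ih =>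
    intro y h
    by_cases hp : p x
    · have hc : leadCount p (x :: t) = leadCount p t + 1 := by simp [leadCount, hp]
      rw [hc, List.drop_succ_cons] at h
      exact ih y h
    · have hc : leadCount p (x :: t) = 0 := by simp [leadCount, hp]
      rw [hc, List.drop_zero, List.head?_cons, Option.some.injEq] at h
      rw [← h]; exact Bool.eq_false_iff.mpr hp

-- transformGo with zero previous across a zero run
theorem transformGo_zero_run (xs : List Int) (grp : Int) :
    transformGo 0 grp xs =
      List.replicate (leadCount (· == 0) xs) 0 ++ transformGo 0 grp (xs.drop (leadCount (· == 0) xs)) := by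
  induction xs generalizing grp with
  | nil => simp [leadCount]
  | cons x t ih =>
    by_cases hx : x = 0
    · subst hx
      simp only [leadCount, transformGo]
      simp only [if_pos (by decide : ((0 : Int) == 0) = true)]
      simp [List.replicate_succ, ih grp]
    · simp [leadCount, hx]

-- transformGo with nonzero previous across a nonzero run
theorem transformGo_nonzero_run (xs : List Int) (grp : Int) :
    transformGo 1 grp xs =
      List.replicate (leadCount (· ≠ 0) xs) grp ++ transformGo 1 grp (xs.drop (leadCount (· ≠ 0) xs)) := by
  induction xs generalizing grp with
  | nil => simp [leadCount]
  | cons x t ih =>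
    by_cases hx : x = 0
    · subst hx
      simp [leadCount, transformGo]
    · have hd : (decide (x ≠ 0)) = true := by simp [hx]
      simp only [leadCount, hd, if_pos]
      simp only [transformGo, if_neg (by simp [hx] : ¬(x ≠ 0 ∧ (1:Int) = 0)), if_pos hx]
      rw [transformGo_prev_nonzero t grp x 1 hx one_ne_zero, ih grp]
      simp [List.replicate_succ]

-- main equivalence, by strong induction on length
theorem transformGo_eq_altGo (n : Nat) :
    ∀ (l : List Int), l.length ≤ n → ∀ grp, transformGo 0 grp l = transformAltGo grp l := by
  induction n with
  | zero =>
    intro l hl grp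
    have : l = [] := List.length_eq_zero_iff.mp (Nat.le_zero.mp hl)
    subst this; simp [transformGo, transformAltGo]
  | succ n ih =>
    intro l hl grp
    cases l with
    | nil => simp [transformGo, transformAltGo]
    | cons x xs =>
      by_cases hx : x = 0
      · subst hx
        rw [transformAltGo]
        simp only [if_neg (by simp : ¬((0:Int) ≠ 0))]
        have step : transformGo 0 grp (0 :: xs) = 0 :: transformGo 0 grp xs := by
          simp [transformGo]
        rw [step, transformGo_zero_run xs grp]
        have hlen : (xs.drop (leadCount (· == 0) xs)).length ≤ n := by
          have := (List.length_drop (i := leadCount (· == 0) xs) (l := xs))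
          have hxs : xs.length ≤ n := by simpa using Nat.le_of_succ_le_succ hl
          omega
        rw [ih _ hlen grp]
        simp [List.replicate_succ]
      · rw [transformAltGo]
        simp only [if_pos hx]
        have step : transformGo 0 grp (x :: xs) = (grp + 1) :: transformGo x (grp + 1) xs := by
          simp [transformGo, hx]
        rw [step, transformGo_prev_nonzero xs (grp + 1) x 1 hx one_ne_zero,
            transformGo_nonzero_run xs (grp + 1)]
        have hhead := head_drop_leadCount (· ≠ 0) xs
        have hz : ∀ y, (xs.drop (leadCount (· ≠ 0) xs)).head? = some y → y = 0 := by
          intro y hy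
          have := hhead y hy
          simpa using this
        rw [transformGo_head_zero _ (grp + 1) 1 0 hz]
        have hlen : (xs.drop (leadCount (· ≠ 0) xs)).length ≤ n := by
          have := (List.length_drop (i := leadCount (· ≠ 0) xs) (l := xs))
          have hxs : xs.length ≤ n := by simpa using Nat.le_of_succ_le_succ hl
          omega
        rw [ih _ hlen (grp + 1)]
        simp [List.replicate_succ]

-- ===== VERDICT (by name: the statement is the Claim_ definition above) =====
theorem transform_spec : Claim_equal_transform := by
  intro lst _
  unfold Spec_transform transform transform_alt
  exact transformGo_eq_altGo lst.length lst le_rfl 0
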